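-- pv_equiv track=rewrite | github.com/netmsglog/usaco | beads.py | max_tail
-- ===== SOURCE A (Python) =====
-- def max_tail(s):
--     l = len(s)
--     cnt = 0
--     pos = l - 1
--     first = s[pos]
--     while pos >= 0:
--         if first == 'w':
--             if s[pos] != 'w':
--                 first = s[pos]
--         if s[pos]==first or s[pos]=='w':
--             cnt = cnt + 1
--         else:
--             return cnt, pos
--             #break
--         pos = pos - 1
--     return cnt, pos
-- ===== SOURCE B (Python) =====
-- def max_tail(s):
--     color = s[-1]
--     t = s[::-1].lstrip('w')
--     if t:
--         color = t[0]
--     rest = t.lstrip('w' + color)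
--     cnt = len(s) - len(rest)
--     return cnt, len(s) - 1 - cnt
-- ===== Notes on version B (the rewrite author's own statement) =====
-- stated objective: simpler
-- what changed: A fuses colour-locking and counting in one backward index loop with an early return; B has no counting loop at all: it reverses the string, strips the leading wildcard run, reads the colour, strips the run matching the colour or a wildcard, and derives both count and break position by closed-form length arithmetic (pos = len(s)-1-cnt uniformly, -1 when everything matched).
import Mathlib
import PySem

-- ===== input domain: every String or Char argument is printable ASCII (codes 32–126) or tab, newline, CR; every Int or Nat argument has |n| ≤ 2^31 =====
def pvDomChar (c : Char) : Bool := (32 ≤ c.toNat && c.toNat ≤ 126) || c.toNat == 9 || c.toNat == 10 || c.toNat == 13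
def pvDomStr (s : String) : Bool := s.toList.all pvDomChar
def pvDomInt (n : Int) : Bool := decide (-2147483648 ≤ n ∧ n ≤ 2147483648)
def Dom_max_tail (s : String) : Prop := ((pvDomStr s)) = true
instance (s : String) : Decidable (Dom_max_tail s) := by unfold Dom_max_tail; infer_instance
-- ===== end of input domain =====

-- B replaces A's backward counting loop by reverse + two lstrip passes with
-- closed-form length arithmetic for count and break position; objective: simpler.

-- ===== PORT A =====
-- A's while loop, pos running down; fuel n = pos + 1, state (first, cnt).
def maxTailLoopA (cs : List Char) : Nat → Char → Int → Int × Int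
  | 0, _, cnt => (cnt, -1)
  | n + 1, first, cnt =>
    let c := cs.getD n ' '
    let first' := if first = 'w' ∧ c ≠ 'w' then c else first
    if c = first' ∨ c = 'w' then maxTailLoopA cs n first' (cnt + 1)
    else (cnt, (n : Int))

def max_tail (s : String) : Int × Int :=
  let cs := s.toList
  let l := cs.length
  maxTailLoopA cs l (cs.getD (l - 1) ' ') 0

-- ===== PORT B =====
-- Source B line by line: s[-1]; s[::-1].lstrip('w'); t[0] if t; t.lstrip('w'+color);
-- lstrip with a char set = dropWhile membership.
def max_tail_alt (s : String) : Int × Int :=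
  let cs := s.toList
  let color0 := cs.getD (cs.length - 1) ' '      -- s[-1]; IndexError on empty, excluded by Pre_
  let t := cs.reverse.dropWhile (· = 'w')        -- s[::-1].lstrip('w')
  let color := match t with | [] => color0 | c :: _ => c
  let rest := t.dropWhile (fun c => c = 'w' ∨ c = color)  -- t.lstrip('w' + color)
  let cnt : Int := (cs.length : Int) - rest.length
  (cnt, (cs.length : Int) - 1 - cnt)

-- ===== PRECONDITION & SPEC =====
-- Pre_ excludes only the empty string, on which A (and B) raise IndexError at s[-1].
def Pre_max_tail (s : String) : Prop := s.toList ≠ []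
instance (s : String) : Decidable (Pre_max_tail s) := by unfold Pre_max_tail; infer_instance
def pvWitness_max_tail : String := "ab"

def Spec_max_tail (s : String) (out : Int × Int) : Prop := out = max_tail_alt s
instance (s : String) (out : Int × Int) : Decidable (Spec_max_tail s out) := by unfold Spec_max_tail; infer_instance

-- ===== CLAIM (what is proved, stated in full; the proofs are below) =====
def Claim_equal_max_tail : Prop := ∀ (s : String), Dom_max_tail s → Pre_max_tail s → Spec_max_tail s (max_tail s)

-- ===== LEMMAS AND PROOFS =====

-- A's index loop rephrased as a forward recursion over the reversed list.
def fwdA : List Char → Char → Int → Int × Int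
  | [], _, cnt => (cnt, -1)
  | c :: r, first, cnt =>
    let first' := if first = 'w' ∧ c ≠ 'w' then c else first
    if c = first' ∨ c = 'w' then fwdA r first' (cnt + 1)
    else (cnt, (r.length : Int))

theorem loopA_eq_fwdA (cs : List Char) :
    ∀ (n : Nat), n ≤ cs.length → ∀ (first : Char) (cnt : Int),
      maxTailLoopA cs n first cnt = fwdA ((cs.take n).reverse) first cnt := by
  intro n
  induction n with
  | zero => intro _ first cnt; rfl
  | succ n ih =>
    intro hn first cnt
    have hlt : n < cs.length := Nat.lt_of_succ_le hn
    have htake : (cs.take (n + 1)).reverse = cs[n] :: (cs.take n).reverse := by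
      rw [List.take_add_one, List.getElem?_eq_getElem hlt]
      simp
    have hget : cs.getD n ' ' = cs[n] := List.getD_eq_getElem cs ' ' hlt
    have hlen : ((cs.take n).reverse).length = n := by
      simp [Nat.le_of_lt hlt]
    simp only [maxTailLoopA, htake, fwdA, hget]
    split_ifs
    all_goals first
      | exact ih (Nat.le_of_lt hlt) _ _
      | rw [hlen]

-- Locked phase: first ≠ 'w' means count the matching prefix, closed form.
theorem fwdA_locked (first : Char) (h : first ≠ 'w') :
    ∀ (r : List Char) (cnt : Int),
      fwdA r first cnt =
        (cnt + (r.length : Int) - (r.dropWhile (fun c => c = 'w' ∨ c = first)).length,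
         ((r.dropWhile (fun c => c = 'w' ∨ c = first)).length : Int) - 1) := by
  intro r
  induction r with
  | nil => intro cnt; simp [fwdA]
  | cons c r ih =>
    intro cnt
    simp only [fwdA]
    have hfix : (if first = 'w' ∧ c ≠ 'w' then c else first) = first := by simp [h]
    rw [hfix]
    by_cases hc : c = 'w' ∨ c = first
    · rw [if_pos hc.symm, ih (cnt + 1)]
      simp only [List.dropWhile_cons, decide_eq_true_eq, if_pos hc, Prod.mk.injEq,
        List.length_cons]
      push_cast; and_intros <;> first | trivial | omega
    · rw [if_neg (fun h' => hc h'.symm)]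
      simp only [List.dropWhile_cons, decide_eq_true_eq, if_neg hc, Prod.mk.injEq,
        List.length_cons]
      push_cast; and_intros <;> first | trivial | omega

-- Wild phase: first = 'w' skips the leading wildcard run, then locks the colour.
theorem fwdA_wild :
    ∀ (r : List Char) (cnt : Int),
      fwdA r 'w' cnt =
        (cnt + (r.length : Int) -
           ((r.dropWhile (· = 'w')).dropWhile
              (fun c => c = 'w' ∨ c = (match r.dropWhile (· = 'w') with | [] => 'w' | d :: _ => d))).length,
         (((r.dropWhile (· = 'w')).dropWhile
              (fun c => c = 'w' ∨ c = (match r.dropWhile (· = 'w') with | [] => 'w' | d :: _ => d))).length : Int) - 1) := by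
  intro r
  induction r with
  | nil => intro cnt; simp [fwdA]
  | cons c r ih =>
    intro cnt
    by_cases hw : c = 'w'
    · subst hw
      simp only [fwdA]
      simp only [ne_eq, not_true_eq_false, and_false, if_false, or_true, if_true]
      rw [ih (cnt + 1)]
      have hdw : (('w' : Char) :: r).dropWhile (· = 'w') = r.dropWhile (· = 'w') := by
        simp
      rw [hdw]
      simp only [Prod.mk.injEq, List.length_cons]
      push_cast; and_intros <;> first | trivial | omega
    · rw [show fwdA (c :: r) 'w' cnt = fwdA r c (cnt + 1) from by simp [fwdA, hw]]
      rw [fwdA_locked c hw r (cnt + 1)]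
      have hdw : (c :: r).dropWhile (· = 'w') = c :: r := by
        simp [hw]
      rw [hdw]
      have hm : (match (c :: r : List Char) with | [] => 'w' | d :: _ => d) = c := rfl
      rw [hm]
      have hdw2 : (c :: r).dropWhile (fun x => x = 'w' ∨ x = c) =
          r.dropWhile (fun x => x = 'w' ∨ x = c) := by
        simp
      rw [hdw2]
      simp only [Prod.mk.injEq, List.length_cons]
      push_cast; and_intros <;> first | trivial | omega

-- ===== VERDICT (by name: the statement is the Claim_ definition above) =====
theorem max_tail_spec : Claim_equal_max_tail := by
  intro s _ hpre
  unfold Spec_max_tail max_tail max_tail_alt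
  simp only []
  set cs := s.toList with hcs
  have hA : maxTailLoopA cs cs.length (cs.getD (cs.length - 1) ' ') 0 =
      fwdA cs.reverse (cs.getD (cs.length - 1) ' ') 0 := by
    have := loopA_eq_fwdA cs cs.length (le_refl _) (cs.getD (cs.length - 1) ' ') 0
    rwa [List.take_length] at this
  rw [hA]
  obtain ⟨c, r, hr⟩ : ∃ c r, cs.reverse = c :: r := by
    have hne : cs.reverse ≠ [] := by simpa using hpre
    cases h : cs.reverse with
    | nil => exact absurd h hne
    | cons c r => exact ⟨c, r, rfl⟩
  have hlast : cs.getD (cs.length - 1) ' ' = c := by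
    have hne : cs ≠ [] := hpre
    have hlen : 0 < cs.length := List.length_pos_of_ne_nil hne
    have h2 : cs.reverse.getD 0 ' ' = cs.getD (cs.length - 1) ' ' := by
      rw [List.getD_eq_getElem _ ' ' (by simpa using hlen),
          List.getD_eq_getElem _ ' ' (by omega)]
      rw [List.getElem_reverse]
      congr 1
    rw [← h2, hr]
    rfl
  rw [hlast, hr]
  have hlenr : cs.length = r.length + 1 := by
    have := congrArg List.length hr
    simpa [Nat.add_comm] using this
  by_cases hw : c = 'w'
  · subst hw
    rw [fwdA_wild (('w' : Char) :: r) 0]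
    have hdw : (('w' : Char) :: r).dropWhile (· = 'w') = r.dropWhile (· = 'w') := by
      simp
    rw [hdw]
    cases ht : r.dropWhile (· = 'w') with
    | nil =>
      simp only [List.dropWhile_nil, List.length_nil, Prod.mk.injEq]
      push_cast [List.length_cons, hlenr]; and_intros <;> first | trivial | omega
    | cons d t =>
      simp only [Prod.mk.injEq]
      push_cast [List.length_cons, hlenr]; and_intros <;> first | trivial | omega
  · rw [fwdA_locked c hw (c :: r) 0]
    have hdw : (c :: r).dropWhile (· = 'w') = c :: r := by
      simp [hw]
    rw [hdw]
    have hm : (match (c :: r : List Char) with | [] => c | d :: _ => d) = c := rfl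
    rw [hm]
    have hdw2 : (c :: r).dropWhile (fun x => x = 'w' ∨ x = c) =
        r.dropWhile (fun x => x = 'w' ∨ x = c) := by
      simp
    rw [hdw2]
    simp only [Prod.mk.injEq]
    push_cast [List.length_cons, hlenr]; and_intros <;> first | trivial | omega
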